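-- pv_equiv track=rewrite | github.com/HaoFries/YOLOv9-DS | SPD/SPD.py | process_samll_rectangles
-- ===== SOURCE A (Python) =====
-- def process_samll_rectangles(rectangles_list, width, height, area_threshold=36, distance_threshold=50):
--     """
--     对矩形列表进行处理，移除面积小于阈值且与其他矩形不重叠的矩形.
--
--     Args:
--     rectangles_list (list): 包含矩形信息的列表，每个矩形由左上角坐标 (x, y) 和宽度 w、高度 h 组成
--     area_threshold (int): 面积阈值，小于该阈值的矩形将被移除
--     distance_threshold (int): 距离阈值，用于判断两个矩形是否不重叠
--     width (int): 矩形所在区域的宽度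
--     height (int): 矩形所在区域的高度
--
--     Returns:
--     list: 处理后的矩形列表，移除面积小于阈值且与其他矩形不重叠的矩形
--
--     """
--     result = list(rectangles_list)
--     to_remove = set()
--
--     for i in range(len(result)):
--         x, y, w, h = result[i]
--         if w * h < area_threshold:
--             center_x = x + w // 2
--             center_y = y + h // 2
--             x1 = max(0, center_x - w // 2 - distance_threshold)
--             x2 = min(width, center_x + w // 2 + distance_threshold)
--             y1 = max(0, center_y - h // 2 - 2 * distance_threshold)
--             y2 = min(height, center_y + h // 2 + 2 * distance_threshold)
--
--             for j in range(len(result)):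
--                 if j != i:
--                     x_, y_, w_, h_ = result[j]
--                     if not (y1 >= y_ + h_ or y2 <= y_ or x1 >= x_ + w_ or x2 <= x_):
--                         # 当前处理的矩形和其他矩形有重叠
--                         to_remove.add(i)
--                         break
--
--     result = [rect for i, rect in enumerate(result) if i not in to_remove]
--     return result
-- ===== SOURCE B (Python) =====
-- def process_samll_rectangles(rectangles_list, width, height, area_threshold=36, distance_threshold=50):
--     """Index-free zipper recursion: walk the list once keeping the rectangles
--     already seen in `before`; a small rectangle is dropped iff its expanded
--     box overlaps any rectangle in before + tail (all the others)."""
--     def box(r):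
--         x, y, w, h = r
--         cx = x + w // 2
--         cy = y + h // 2
--         return (max(0, cx - w // 2 - distance_threshold),
--                 min(width, cx + w // 2 + distance_threshold),
--                 max(0, cy - h // 2 - 2 * distance_threshold),
--                 min(height, cy + h // 2 + 2 * distance_threshold))
--
--     def hits(b, others):
--         x1, x2, y1, y2 = b
--         return any(x_ < x2 and x1 < x_ + w_ and y_ < y2 and y1 < y_ + h_
--                    for (x_, y_, w_, h_) in others)
--
--     def go(before, rest):
--         if not rest:
--             return []
--         r, tail = rest[0], rest[1:]
--         kept = go(before + [r], tail)
--         if r[2] * r[3] < area_threshold and hits(box(r), before + tail):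
--             return kept
--         return [r] + kept
--
--     return go([], list(rectangles_list))
-- ===== Notes on version B (the rewrite author's own statement) =====
-- stated objective: alternative
-- what changed: Replaces A's two-phase design (index loops building a removal index set, then an enumerate filter) by one index-free zipper recursion over the list itself: each rectangle is kept or dropped on the spot by testing its expanded box against the other rectangles as before++tail, with no indices, no set and no second pass.
import Mathlib
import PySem

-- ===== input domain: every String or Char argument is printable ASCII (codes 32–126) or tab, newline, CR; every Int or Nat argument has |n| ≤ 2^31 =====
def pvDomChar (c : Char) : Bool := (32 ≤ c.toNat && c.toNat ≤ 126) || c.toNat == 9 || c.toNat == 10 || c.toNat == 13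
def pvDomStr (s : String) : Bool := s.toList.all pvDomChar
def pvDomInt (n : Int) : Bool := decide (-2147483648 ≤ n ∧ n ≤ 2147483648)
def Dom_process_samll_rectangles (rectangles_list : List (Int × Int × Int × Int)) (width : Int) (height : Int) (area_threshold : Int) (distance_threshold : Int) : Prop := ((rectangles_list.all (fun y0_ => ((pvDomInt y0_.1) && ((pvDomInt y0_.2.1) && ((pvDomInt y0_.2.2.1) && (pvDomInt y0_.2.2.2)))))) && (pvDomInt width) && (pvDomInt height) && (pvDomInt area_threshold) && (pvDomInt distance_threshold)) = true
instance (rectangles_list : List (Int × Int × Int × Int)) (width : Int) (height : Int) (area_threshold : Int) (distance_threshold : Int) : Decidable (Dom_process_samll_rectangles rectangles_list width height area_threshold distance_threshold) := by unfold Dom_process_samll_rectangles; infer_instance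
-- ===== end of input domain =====

-- B replaces A's two-phase design (index loops building a removal index set, then a
-- second filtering pass) by a single index-free zipper recursion over the list itself:
-- each rectangle is kept or dropped on the spot by testing its expanded box against
-- the other rectangles given as before ++ tail (alternative decomposition, no speed claim).

-- ===== PORT A =====
-- inner 'for j in range(len(result)): … break' loop of A
def pvAInner (result : List (Int × Int × Int × Int)) (i x1 x2 y1 y2 : Int) : List Int → Bool
  | [] => false
  | j :: js =>
    if j ≠ i then
      let r := PySem.List.pyGetD result j (0, 0, 0, 0)
      if ¬(y1 ≥ r.2.1 + r.2.2.2 ∨ y2 ≤ r.2.1 ∨ x1 ≥ r.1 + r.2.2.1 ∨ x2 ≤ r.1) then true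
      else pvAInner result i x1 x2 y1 y2 js
    else pvAInner result i x1 x2 y1 y2 js

-- outer 'for i in range(len(result))' loop of A, accumulating to_remove
def pvAOuter (result : List (Int × Int × Int × Int)) (width height area_threshold distance_threshold : Int) (s : PySem.Set Int) : List Int → PySem.Set Int
  | [] => s
  | i :: is =>
    let r := PySem.List.pyGetD result i (0, 0, 0, 0)
    if r.2.2.1 * r.2.2.2 < area_threshold then
      let center_x := r.1 + PySem.Int.floordiv r.2.2.1 2
      let center_y := r.2.1 + PySem.Int.floordiv r.2.2.2 2
      let x1 := max 0 (center_x - PySem.Int.floordiv r.2.2.1 2 - distance_threshold)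
      let x2 := min width (center_x + PySem.Int.floordiv r.2.2.1 2 + distance_threshold)
      let y1 := max 0 (center_y - PySem.Int.floordiv r.2.2.2 2 - 2 * distance_threshold)
      let y2 := min height (center_y + PySem.Int.floordiv r.2.2.2 2 + 2 * distance_threshold)
      if pvAInner result i x1 x2 y1 y2 (PySem.List.pyRange 0 (PySem.List.len result) 1) then
        pvAOuter result width height area_threshold distance_threshold (PySem.Set.add s i) is
      else pvAOuter result width height area_threshold distance_threshold s is
    else pvAOuter result width height area_threshold distance_threshold s is

def process_samll_rectangles (rectangles_list : List (Int × Int × Int × Int)) (width : Int) (height : Int) (area_threshold : Int) (distance_threshold : Int) : List (Int × Int × Int × Int) :=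
  let result := rectangles_list
  let to_remove := pvAOuter result width height area_threshold distance_threshold PySem.Set.empty (PySem.List.pyRange 0 (PySem.List.len result) 1)
  ((PySem.List.enumerate result 0).filter (fun p => !(PySem.Set.contains to_remove p.1))).map (fun p => p.2)

-- ===== PORT B =====
-- B's helper box(r): the expanded, clamped box of rectangle r
def pvBox (width height distance_threshold : Int) (r : Int × Int × Int × Int) : Int × Int × Int × Int :=
  let cx := r.1 + PySem.Int.floordiv r.2.2.1 2
  let cy := r.2.1 + PySem.Int.floordiv r.2.2.2 2
  (max 0 (cx - PySem.Int.floordiv r.2.2.1 2 - distance_threshold),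
   min width (cx + PySem.Int.floordiv r.2.2.1 2 + distance_threshold),
   max 0 (cy - PySem.Int.floordiv r.2.2.2 2 - 2 * distance_threshold),
   min height (cy + PySem.Int.floordiv r.2.2.2 2 + 2 * distance_threshold))

-- B's helper hits(b, others): any(...) generator expression
def pvHits (b : Int × Int × Int × Int) (others : List (Int × Int × Int × Int)) : Bool :=
  others.any (fun r => decide (r.1 < b.2.1 ∧ b.1 < r.1 + r.2.2.1 ∧ r.2.1 < b.2.2.2 ∧ b.2.2.1 < r.2.1 + r.2.2.2))

-- B's zipper recursion go(before, rest)
def pvGo (width height area_threshold distance_threshold : Int) (before : List (Int × Int × Int × Int)) : List (Int × Int × Int × Int) → List (Int × Int × Int × Int)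
  | [] => []
  | r :: tail =>
    let kept := pvGo width height area_threshold distance_threshold (before ++ [r]) tail
    if r.2.2.1 * r.2.2.2 < area_threshold ∧ pvHits (pvBox width height distance_threshold r) (before ++ tail) = true
    then kept
    else r :: kept

def process_samll_rectangles_alt (rectangles_list : List (Int × Int × Int × Int)) (width : Int) (height : Int) (area_threshold : Int) (distance_threshold : Int) : List (Int × Int × Int × Int) :=
  pvGo width height area_threshold distance_threshold [] rectangles_list

-- ===== PRECONDITION & SPEC =====
def Spec_process_samll_rectangles (rectangles_list : List (Int × Int × Int × Int)) (width : Int) (height : Int) (area_threshold : Int) (distance_threshold : Int) (out : List (Int × Int × Int × Int)) : Prop := out = process_samll_rectangles_alt rectangles_list width height area_threshold distance_threshold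
instance (rectangles_list : List (Int × Int × Int × Int)) (width : Int) (height : Int) (area_threshold : Int) (distance_threshold : Int) (out : List (Int × Int × Int × Int)) : Decidable (Spec_process_samll_rectangles rectangles_list width height area_threshold distance_threshold out) := by unfold Spec_process_samll_rectangles; infer_instance

-- ===== CLAIM (what is proved, stated in full; the proofs are below) =====
def Claim_equal_process_samll_rectangles : Prop := ∀ (rectangles_list : List (Int × Int × Int × Int)) (width : Int) (height : Int) (area_threshold : Int) (distance_threshold : Int), Dom_process_samll_rectangles rectangles_list width height area_threshold distance_threshold → Spec_process_samll_rectangles rectangles_list width height area_threshold distance_threshold (process_samll_rectangles rectangles_list width height area_threshold distance_threshold)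

-- ===== LEMMAS AND PROOFS =====

-- the overlap condition A's inner loop tests, as one boolean predicate on the index j
def pvCond (rects : List (Int × Int × Int × Int)) (i x1 x2 y1 y2 j : Int) : Bool :=
  decide (j ≠ i ∧ (PySem.List.pyGetD rects j (0, 0, 0, 0)).1 < x2 ∧
    x1 < (PySem.List.pyGetD rects j (0, 0, 0, 0)).1 + (PySem.List.pyGetD rects j (0, 0, 0, 0)).2.2.1 ∧
    (PySem.List.pyGetD rects j (0, 0, 0, 0)).2.1 < y2 ∧
    y1 < (PySem.List.pyGetD rects j (0, 0, 0, 0)).2.1 + (PySem.List.pyGetD rects j (0, 0, 0, 0)).2.2.2)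

theorem pvAInner_eq_any (rects : List (Int × Int × Int × Int)) (i x1 x2 y1 y2 : Int) (l : List Int) :
    pvAInner rects i x1 x2 y1 y2 l = l.any (pvCond rects i x1 x2 y1 y2) := by
  induction l with
  | nil => rfl
  | cons j js ih =>
    simp only [pvAInner, List.any_cons, ih]
    by_cases hj : j ≠ i
    · rw [if_pos hj]
      by_cases hov : ¬(y1 ≥ (PySem.List.pyGetD rects j (0, 0, 0, 0)).2.1 + (PySem.List.pyGetD rects j (0, 0, 0, 0)).2.2.2 ∨
          y2 ≤ (PySem.List.pyGetD rects j (0, 0, 0, 0)).2.1 ∨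
          x1 ≥ (PySem.List.pyGetD rects j (0, 0, 0, 0)).1 + (PySem.List.pyGetD rects j (0, 0, 0, 0)).2.2.1 ∨
          x2 ≤ (PySem.List.pyGetD rects j (0, 0, 0, 0)).1)
      · rw [if_pos hov]
        have hc : pvCond rects i x1 x2 y1 y2 j = true := by
          unfold pvCond; rw [decide_eq_true_eq]; omega
        simp [hc]
      · rw [if_neg hov]
        have hc : pvCond rects i x1 x2 y1 y2 j = false := by
          unfold pvCond; rw [decide_eq_false_iff_not]; omega
        simp [hc]
    · rw [if_neg hj]
      have hc : pvCond rects i x1 x2 y1 y2 j = false := by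
        unfold pvCond; rw [decide_eq_false_iff_not]; tauto
      simp [hc]

-- the flag A's outer loop computes for index i (small area AND overlaps some other rect)
def pvFlagA (rects : List (Int × Int × Int × Int)) (width height area_threshold distance_threshold i : Int) : Bool :=
  let r := PySem.List.pyGetD rects i (0, 0, 0, 0)
  let cx := r.1 + PySem.Int.floordiv r.2.2.1 2
  let cy := r.2.1 + PySem.Int.floordiv r.2.2.2 2
  decide (r.2.2.1 * r.2.2.2 < area_threshold) &&
    pvAInner rects i (max 0 (cx - PySem.Int.floordiv r.2.2.1 2 - distance_threshold))
      (min width (cx + PySem.Int.floordiv r.2.2.1 2 + distance_threshold))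
      (max 0 (cy - PySem.Int.floordiv r.2.2.2 2 - 2 * distance_threshold))
      (min height (cy + PySem.Int.floordiv r.2.2.2 2 + 2 * distance_threshold))
      (PySem.List.pyRange 0 (PySem.List.len rects) 1)

theorem pvAOuter_mem (rects : List (Int × Int × Int × Int)) (width height area_threshold distance_threshold : Int)
    (l : List Int) (s : PySem.Set Int) (k : Int) :
    (k ∈ pvAOuter rects width height area_threshold distance_threshold s l) ↔
      (k ∈ s ∨ ∃ i ∈ l, i = k ∧ pvFlagA rects width height area_threshold distance_threshold i = true) := by
  induction l generalizing s with
  | nil => simp [pvAOuter]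
  | cons i is ih =>
    have hstep : pvAOuter rects width height area_threshold distance_threshold s (i :: is) =
        pvAOuter rects width height area_threshold distance_threshold
          (if pvFlagA rects width height area_threshold distance_threshold i then PySem.Set.add s i else s) is := by
      simp only [pvAOuter, pvFlagA]
      by_cases hsm : (PySem.List.pyGetD rects i (0,0,0,0)).2.2.1 * (PySem.List.pyGetD rects i (0,0,0,0)).2.2.2 < area_threshold
      · simp only [if_pos hsm, decide_eq_true hsm, Bool.true_and]
        split <;> simp_all
      · simp [hsm]
    rw [hstep, ih]
    by_cases hf : pvFlagA rects width height area_threshold distance_threshold i = true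
    · simp only [if_pos hf, PySem.Set.mem_add, List.mem_cons]
      constructor
      · rintro (⟨hs | rfl⟩ | ⟨j, hj, rfl, hfj⟩)
        · exact Or.inl hs
        · exact Or.inr ⟨k, Or.inl rfl, rfl, hf⟩
        · exact Or.inr ⟨j, Or.inr hj, rfl, hfj⟩
      · rintro (hs | ⟨j, (rfl | hj), rfl, hfj⟩)
        · exact Or.inl (Or.inl hs)
        · exact Or.inl (Or.inr rfl)
        · exact Or.inr ⟨j, hj, rfl, hfj⟩
    · simp only [if_neg hf, List.mem_cons]
      constructor
      · rintro (hs | ⟨j, hj, rfl, hfj⟩)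
        · exact Or.inl hs
        · exact Or.inr ⟨j, Or.inr hj, rfl, hfj⟩
      · rintro (hs | ⟨j, (rfl | hj), rfl, hfj⟩)
        · exact Or.inl hs
        · exact absurd hfj hf
        · exact Or.inr ⟨j, hj, rfl, hfj⟩

-- membership in "all rectangles except position k"
theorem pv_mem_others_iff (l : List (Int × Int × Int × Int)) (k : Nat) (r : Int × Int × Int × Int) :
    r ∈ l.take k ++ l.drop (k + 1) ↔ ∃ m, ∃ _ : m < l.length, m ≠ k ∧ l[m] = r := by
  rw [List.mem_append]
  constructor
  · rintro (h | h)
    · obtain ⟨m, hm, hEq⟩ := List.mem_iff_getElem.mp h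
      have hm' : m < k ∧ m < l.length := by simpa using hm
      exact ⟨m, hm'.2, by omega, by rw [← hEq]; exact (List.getElem_take).symm⟩
    · obtain ⟨m, hm, hEq⟩ := List.mem_iff_getElem.mp h
      have hm' : m < l.length - (k + 1) := by simpa using hm
      refine ⟨k + 1 + m, by omega, by omega, ?_⟩
      rw [← hEq, List.getElem_drop]
  · rintro ⟨m, hm, hne, rfl⟩
    rcases Nat.lt_or_ge m k with hlt | hge
    · exact Or.inl (List.mem_iff_getElem.mpr ⟨m, by simp; omega, List.getElem_take⟩)
    · have hgt : k + 1 ≤ m := by omega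
      refine Or.inr (List.mem_iff_getElem.mpr ⟨m - (k + 1), by simp; omega, ?_⟩)
      rw [List.getElem_drop]
      congr 1
      omega

-- A's range-scan with j ≠ k equals B's scan of the other rectangles
theorem pv_any_range_eq (rects : List (Int × Int × Int × Int)) (x1 x2 y1 y2 : Int) (k : Nat) :
    (PySem.List.pyRange 0 (PySem.List.len rects) 1).any (pvCond rects (↑k) x1 x2 y1 y2)
      = pvHits (x1, x2, y1, y2) (rects.take k ++ rects.drop (k + 1)) := by
  rw [Bool.eq_iff_iff, List.any_eq_true]
  unfold pvHits
  rw [List.any_eq_true]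
  constructor
  · rintro ⟨j, hj, hc⟩
    rw [PySem.List.mem_pyRange_one, PySem.List.len_eq] at hj
    unfold pvCond at hc
    rw [decide_eq_true_eq] at hc
    obtain ⟨hne, h1, h2, h3, h4⟩ := hc
    set m := j.toNat with hmdef
    have hjm : j = ↑m := by omega
    have hmn : m < rects.length := by omega
    have hget : PySem.List.pyGetD rects j (0,0,0,0) = rects[m] := by
      rw [hjm]; simp [List.getD_eq_getElem?_getD, hmn]
    refine ⟨rects[m], (pv_mem_others_iff rects k rects[m]).mpr ⟨m, hmn, by omega, rfl⟩, ?_⟩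
    rw [decide_eq_true_eq]
    rw [hget] at h1 h2 h3 h4
    exact ⟨h1, h2, h3, h4⟩
  · rintro ⟨r, hr, hc⟩
    obtain ⟨m, hmn, hne, rfl⟩ := (pv_mem_others_iff rects k r).mp hr
    rw [decide_eq_true_eq] at hc
    refine ⟨↑m, ?_, ?_⟩
    · rw [PySem.List.mem_pyRange_one, PySem.List.len_eq]; omega
    · have hget : PySem.List.pyGetD rects (↑m) (0,0,0,0) = rects[m] := by
        simp [List.getD_eq_getElem?_getD, hmn]
      unfold pvCond
      rw [decide_eq_true_eq, hget]
      refine ⟨by omega, hc.1, hc.2.1, hc.2.2.1, hc.2.2.2⟩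

-- B's keep test at absolute position k of the full list (proof-side reformulation)
def pvKeep (width height area_threshold distance_threshold : Int) (full : List (Int × Int × Int × Int)) (k : Nat) (r : Int × Int × Int × Int) : Bool :=
  !(decide (r.2.2.1 * r.2.2.2 < area_threshold) &&
    pvHits (pvBox width height distance_threshold r) (full.take k ++ full.drop (k + 1)))

theorem pvGo_spec (width height area_threshold distance_threshold : Int) :
    ∀ (tail before : List (Int × Int × Int × Int)),
      pvGo width height area_threshold distance_threshold before tail
        = ((PySem.List.enumerate tail (before.length : Int)).filter
            (fun p => pvKeep width height area_threshold distance_threshold (before ++ tail) p.1.toNat p.2)).map (fun p => p.2) := by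
  intro tail
  induction tail with
  | nil => intro before; simp [pvGo, PySem.List.enumerate_nil]
  | cons r tail ih =>
    intro before
    rw [PySem.List.enumerate_cons]
    have hfull : before ++ r :: tail = (before ++ [r]) ++ tail := by simp
    have ht : (before ++ r :: tail).take before.length = before := List.take_left
    have hd : (before ++ r :: tail).drop (before.length + 1) = tail := by
      rw [hfull]
      have h1 : before.length + 1 = (before ++ [r]).length := by simp
      rw [h1, List.drop_left]
    have hhead : pvKeep width height area_threshold distance_threshold (before ++ r :: tail) (before.length : Int).toNat r
        = !(decide (r.2.2.1 * r.2.2.2 < area_threshold) && pvHits (pvBox width height distance_threshold r) (before ++ tail)) := by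
      unfold pvKeep
      rw [Int.toNat_natCast, ht, hd]
    have htailpred : ∀ p ∈ PySem.List.enumerate tail ((before.length : Int) + 1),
        (pvKeep width height area_threshold distance_threshold (before ++ r :: tail) p.1.toNat p.2)
          = (pvKeep width height area_threshold distance_threshold ((before ++ [r]) ++ tail) p.1.toNat p.2) := by
      intro p _
      rw [hfull]
    have hcast : ((before ++ [r]).length : Int) = (before.length : Int) + 1 := by simp
    simp only [pvGo, List.filter_cons, hhead]
    rw [List.filter_congr htailpred, ← hcast]
    by_cases hc : r.2.2.1 * r.2.2.2 < area_threshold ∧ pvHits (pvBox width height distance_threshold r) (before ++ tail) = true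
    · rw [if_pos hc]
      have hb : (!(decide (r.2.2.1 * r.2.2.2 < area_threshold) && pvHits (pvBox width height distance_threshold r) (before ++ tail))) = false := by
        simp [hc.1, hc.2]
      rw [hb, if_neg (by simp : ¬(false = true))]
      exact ih (before ++ [r])
    · rw [if_neg hc]
      have hb : (!(decide (r.2.2.1 * r.2.2.2 < area_threshold) && pvHits (pvBox width height distance_threshold r) (before ++ tail))) = true := by
        rcases not_and_or.mp hc with h | h
        · simp [h]
        · simp [Bool.eq_false_iff.mpr h]
      rw [hb, if_pos rfl, List.map_cons, ih (before ++ [r])]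

-- A's per-index flag equals the negation of B's keep test
theorem pvFlag_eq_keep (rects : List (Int × Int × Int × Int)) (width height area_threshold distance_threshold : Int)
    (k : Nat) (hk : k < rects.length) :
    (!(pvFlagA rects width height area_threshold distance_threshold ↑k))
      = pvKeep width height area_threshold distance_threshold rects k rects[k] := by
  have hget : PySem.List.pyGetD rects (↑k) (0,0,0,0) = rects[k] := by
    simp [List.getD_eq_getElem?_getD, hk]
  unfold pvFlagA pvKeep pvBox
  simp only [hget]
  congr 1
  rw [pvAInner_eq_any, pv_any_range_eq]

-- ===== VERDICT (by name: the statement is the Claim_ definition above) =====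
theorem process_samll_rectangles_spec : Claim_equal_process_samll_rectangles := by
  intro rects width height area_threshold distance_threshold _
  unfold Spec_process_samll_rectangles process_samll_rectangles process_samll_rectangles_alt
  simp only
  rw [pvGo_spec]
  refine congrArg (List.map (fun p : Int × (Int × Int × Int × Int) => p.2)) ?_
  apply List.filter_congr
  intro p hp
  rw [PySem.List.mem_enumerate_iff] at hp
  obtain ⟨k, hk, rfl⟩ := hp
  simp only [zero_add, List.nil_append]
  have hmem : ((↑k : Int) ∈ pvAOuter rects width height area_threshold distance_threshold PySem.Set.empty (PySem.List.pyRange 0 (PySem.List.len rects) 1)) ↔ pvFlagA rects width height area_threshold distance_threshold ↑k = true := by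
    rw [pvAOuter_mem]
    constructor
    · rintro (h | ⟨i, hi, rfl, hfi⟩)
      · simp [PySem.Set.empty] at h
      · exact hfi
    · intro hf
      refine Or.inr ⟨↑k, ?_, rfl, hf⟩
      rw [PySem.List.mem_pyRange_one]
      constructor
      · positivity
      · rw [PySem.List.len_eq]; exact_mod_cast hk
  have hco : PySem.Set.contains (pvAOuter rects width height area_threshold distance_threshold PySem.Set.empty (PySem.List.pyRange 0 (PySem.List.len rects) 1)) ↑k = pvFlagA rects width height area_threshold distance_threshold ↑k := by
    have h := (PySem.Set.contains_iff _ _).trans hmem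
    cases hA : PySem.Set.contains (pvAOuter rects width height area_threshold distance_threshold PySem.Set.empty (PySem.List.pyRange 0 (PySem.List.len rects) 1)) ↑k <;>
      cases hB : pvFlagA rects width height area_threshold distance_threshold ↑k <;> simp_all
  rw [hco, pvFlag_eq_keep rects width height area_threshold distance_threshold k hk, Int.toNat_natCast]
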